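-- pv_equiv track=rewrite | github.com/agSant01/advent-of-code-python | 2016/day02.py | move_keypad_diamond
-- ===== SOURCE A (Python) =====
-- KEYPAD = [
--     "0",
--     "0",
--     "1",
--     "0",
--     "0",
--     "0",
--     "2",
--     "3",
--     "4",
--     "0",
--     "5",
--     "6",
--     "7",
--     "8",
--     "9",
--     "0",
--     "A",
--     "B",
--     "C",
--     "0",
--     "0",
--     "0",
--     "D",
--     "0",
--     "0",
-- ]
--
-- def move_keypad_diamond(sequence, start):
--     WIDTH = 5
--
--     def UP(x):
--         return x - WIDTH if x - WIDTH >= 0 and KEYPAD[x - WIDTH] != "0" else x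
--
--     def DOWN(x):
--         return x + WIDTH if x + WIDTH < 25 and KEYPAD[x + WIDTH] != "0" else x
--
--     def LEFT(x):
--         return x - 1 if (x % WIDTH - 1) >= 0 and KEYPAD[x - 1] != "0" else x
--
--     def RIGHT(x):
--         return x + 1 if (x % WIDTH + 1) < WIDTH and KEYPAD[x + 1] != "0" else x
--
--     for inst in sequence:
--         if inst == "L":
--             start = LEFT(start)
--         if inst == "R":
--             start = RIGHT(start)
--         if inst == "U":
--             start = UP(start)
--         if inst == "D":
--             start = DOWN(start)
--
--     return start
-- ===== SOURCE B (Python) =====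
-- def move_keypad_diamond(sequence, start):
--     DELTA = {"L": (0, -1), "R": (0, 1), "U": (-1, 0), "D": (1, 0)}
--
--     def move(d, i):
--         r, c = divmod(i, 5)
--         r, c = r + d[0], c + d[1]
--         return r * 5 + c if abs(r - 2) + abs(c - 2) <= 2 else i
--
--     # compose the whole sequence's effect on every pad cell at once:
--     # dest[i] = where cell i ends up after the instructions processed so far
--     dest = list(range(25))
--     for inst in sequence:
--         d = DELTA.get(inst)
--         if d is not None:
--             dest = [move(d, j) for j in dest]
--     return dest[start] if 0 <= start < 25 else start
-- ===== Notes on version B (the rewrite author's own statement) =====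
-- stated objective: alternative
-- what changed: B no longer simulates a single position: it composes the effect of the whole instruction sequence on all 25 pad cells at once (a destination table dest, remapped elementwise per instruction with an arithmetic diamond test abs(r-2)+abs(c-2)<=2 instead of A's KEYPAD string table and per-direction flat-index checks) and finally looks up dest[start].
-- outside the precondition, e.g. on move_keypad_diamond('D', -20): A returns -15, B returns -20; on move_keypad_diamond('U', 30): A raises IndexError, B returns 30
import Mathlib
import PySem

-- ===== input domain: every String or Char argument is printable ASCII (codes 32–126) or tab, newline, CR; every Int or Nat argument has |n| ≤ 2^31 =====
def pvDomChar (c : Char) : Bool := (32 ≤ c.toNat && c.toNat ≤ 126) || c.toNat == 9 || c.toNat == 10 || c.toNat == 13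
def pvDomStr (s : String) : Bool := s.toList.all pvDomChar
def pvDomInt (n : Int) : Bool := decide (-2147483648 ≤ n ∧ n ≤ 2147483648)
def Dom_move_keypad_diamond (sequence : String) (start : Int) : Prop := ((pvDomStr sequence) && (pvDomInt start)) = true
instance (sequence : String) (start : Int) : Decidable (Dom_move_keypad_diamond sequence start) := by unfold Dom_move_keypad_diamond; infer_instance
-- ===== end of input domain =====

-- B composes the whole instruction sequence's effect on all 25 pad cells at once
-- (a destination table remapped per instruction, validity by the diamond formula)
-- instead of A's single-position simulation over a string table; same return value
-- on the keypad's natural index range 0..24.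

-- ===== PORT A =====
def KEYPAD : List String :=
  ["0","0","1","0","0",
   "0","2","3","4","0",
   "5","6","7","8","9",
   "0","A","B","C","0",
   "0","0","D","0","0"]

-- KEYPAD[i]; the `getD "0"` arm is IndexError territory, excluded by Pre_ (inside Pre_
-- every index taken is in range, so this is exact there).
def aKey (i : Int) : String := (PySem.List.pyGet? KEYPAD i).getD "0"

def aUP (x : Int) : Int := if 0 ≤ x - 5 ∧ aKey (x - 5) ≠ "0" then x - 5 else x
def aDOWN (x : Int) : Int := if x + 5 < 25 ∧ aKey (x + 5) ≠ "0" then x + 5 else x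
def aLEFT (x : Int) : Int := if 0 ≤ PySem.Int.mod x 5 - 1 ∧ aKey (x - 1) ≠ "0" then x - 1 else x
def aRIGHT (x : Int) : Int := if PySem.Int.mod x 5 + 1 < 5 ∧ aKey (x + 1) ≠ "0" then x + 1 else x

-- the body of A's for-loop: four successive (non-elif) if-statements
def aStep (x : Int) (inst : Char) : Int :=
  let x := if inst = 'L' then aLEFT x else x
  let x := if inst = 'R' then aRIGHT x else x
  let x := if inst = 'U' then aUP x else x
  let x := if inst = 'D' then aDOWN x else x
  x

def move_keypad_diamond (sequence : String) (start : Int) : Int :=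
  sequence.toList.foldl aStep start

-- ===== PORT B =====
-- DELTA.get(inst)
def bDelta (inst : Char) : Option (Int × Int) :=
  if inst = 'L' then some (0, -1)
  else if inst = 'R' then some (0, 1)
  else if inst = 'U' then some (-1, 0)
  else if inst = 'D' then some (1, 0)
  else none

-- move(d, i): shift (row, col) by d, keep it only if inside the diamond
def bMove (d : Int × Int) (i : Int) : Int :=
  let r := PySem.Int.floordiv i 5 + d.1
  let c := PySem.Int.mod i 5 + d.2
  if |r - 2| + |c - 2| ≤ 2 then r * 5 + c else i

-- loop body: remap the whole destination table for one instruction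
def bStep (dest : List Int) (inst : Char) : List Int :=
  match bDelta inst with
  | none => dest
  | some d => dest.map (bMove d)

def move_keypad_diamond_alt (sequence : String) (start : Int) : Int :=
  let dest := sequence.toList.foldl bStep (PySem.List.pyRange 0 25 1)
  -- dest[start] if 0 <= start < 25 else start  (index in range, so pyGet? is exact)
  if 0 ≤ start ∧ start < 25 then (PySem.List.pyGet? dest start).getD start else start

-- ===== PRECONDITION & SPEC =====
-- Pre_ admits the keypad's flat-index range 0..24 (the function's natural domain), and
-- additionally any start when the sequence contains no movement instruction (both
-- programs then return start unchanged); for an out-of-range start with instructions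
-- A's direct string-table indexing raises IndexError on most sequences, and no
-- behaviour is specified there.
def Pre_move_keypad_diamond (sequence : String) (start : Int) : Prop :=
  (0 ≤ start ∧ start < 25) ∨
  (∀ c ∈ sequence.toList, c ≠ 'L' ∧ c ≠ 'R' ∧ c ≠ 'U' ∧ c ≠ 'D')
instance (sequence : String) (start : Int) : Decidable (Pre_move_keypad_diamond sequence start) := by
  unfold Pre_move_keypad_diamond; infer_instance

def pvWitness_move_keypad_diamond : String × Int := ("ULDRRDDUx", 10)

def Spec_move_keypad_diamond (sequence : String) (start : Int) (out : Int) : Prop := out = move_keypad_diamond_alt sequence start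
instance (sequence : String) (start : Int) (out : Int) : Decidable (Spec_move_keypad_diamond sequence start out) := by unfold Spec_move_keypad_diamond; infer_instance

-- ===== CLAIM =====
def Claim_equal_move_keypad_diamond : Prop := ∀ (sequence : String) (start : Int), Dom_move_keypad_diamond sequence start → Pre_move_keypad_diamond sequence start → Spec_move_keypad_diamond sequence start (move_keypad_diamond sequence start)

-- ===== LEMMAS AND PROOFS =====

-- the elementwise action of one instruction on one table entry
def gElem (x : Int) (inst : Char) : Int :=
  match bDelta inst with
  | none => x
  | some d => bMove d x

lemma bStep_eq_map (v : List Int) (c : Char) : bStep v c = v.map (fun x => gElem x c) := by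
  unfold bStep gElem
  cases h : bDelta c <;> simp

lemma foldl_bStep_map (l : List Char) (v : List Int) :
    l.foldl bStep v = v.map (fun x => l.foldl gElem x) := by
  induction l generalizing v with
  | nil => simp
  | cons c t ih =>
    rw [List.foldl_cons, bStep_eq_map, ih, List.map_map]
    simp [Function.comp, List.foldl_cons]

lemma stepAgree (inst : Char) (x : Int) (h0 : 0 ≤ x) (h1 : x < 25) :
    0 ≤ aStep x inst ∧ aStep x inst < 25 ∧ gElem x inst = aStep x inst := by
  by_cases h : inst = 'L' ∨ inst = 'R' ∨ inst = 'U' ∨ inst = 'D'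
  · obtain ⟨n, rfl⟩ := Int.eq_ofNat_of_zero_le h0
    have hn : n < 25 := by exact_mod_cast h1
    clear h0 h1
    rcases h with rfl | rfl | rfl | rfl <;> revert hn <;> revert n <;> decide
  · push Not at h
    obtain ⟨hL, hR, hU, hD⟩ := h
    refine ⟨?_, ?_, ?_⟩ <;> simp [aStep, gElem, bDelta, hL, hR, hU, hD] <;> omega

lemma foldl_agree (l : List Char) (x : Int) (h0 : 0 ≤ x) (h1 : x < 25) :
    0 ≤ l.foldl aStep x ∧ l.foldl aStep x < 25 ∧ l.foldl gElem x = l.foldl aStep x := by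
  induction l generalizing x with
  | nil => exact ⟨h0, h1, rfl⟩
  | cons c t ih =>
    obtain ⟨hb0, hb1, hb⟩ := stepAgree c x h0 h1
    simp only [List.foldl_cons, hb]
    exact ih (aStep x c) hb0 hb1

lemma aStep_id (x : Int) (c : Char) (hL : c ≠ 'L') (hR : c ≠ 'R') (hU : c ≠ 'U') (hD : c ≠ 'D') :
    aStep x c = x := by simp [aStep, hL, hR, hU, hD]

lemma gElem_id (x : Int) (c : Char) (hL : c ≠ 'L') (hR : c ≠ 'R') (hU : c ≠ 'U') (hD : c ≠ 'D') :
    gElem x c = x := by simp [gElem, bDelta, hL, hR, hU, hD]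

lemma foldl_id_of (f : Int → Char → Int) (l : List Char)
    (h : ∀ y c, c ∈ l → f y c = y) (x : Int) : l.foldl f x = x := by
  induction l generalizing x with
  | nil => rfl
  | cons c t ih =>
    rw [List.foldl_cons, h x c (List.mem_cons_self), ih (fun y c' hc' => h y c' (List.mem_cons_of_mem _ hc'))]

-- B's final lookup: dest[n] for n < 25 is the fold of gElem from n
lemma dest_lookup (l : List Char) (n : Nat) (hn : n < 25) :
    PySem.List.pyGet? (l.foldl bStep (PySem.List.pyRange 0 25 1)) (n : Int)
      = some (l.foldl gElem (n : Int)) := by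
  rw [foldl_bStep_map]
  rw [PySem.List.pyGet?_natCast]
  rw [List.getElem?_map]
  rw [PySem.List.getElem?_pyRange_one]
  simp [hn]

-- ===== VERDICT =====
theorem move_keypad_diamond_spec : Claim_equal_move_keypad_diamond := by
  intro sequence start _ hpre
  unfold Spec_move_keypad_diamond move_keypad_diamond move_keypad_diamond_alt
  rcases hpre with ⟨h0, h1⟩ | hno
  · obtain ⟨n, rfl⟩ := Int.eq_ofNat_of_zero_le h0
    have hn : n < 25 := by exact_mod_cast h1
    simp only [if_pos (And.intro h0 h1), dest_lookup sequence.toList n hn, Option.getD_some]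
    exact ((foldl_agree sequence.toList _ h0 h1).2.2).symm
  · rw [foldl_id_of aStep _ (fun y c hc => aStep_id y c (hno c hc).1 (hno c hc).2.1 (hno c hc).2.2.1 (hno c hc).2.2.2)]
    split_ifs with h
    · obtain ⟨n, rfl⟩ := Int.eq_ofNat_of_zero_le h.1
      have hn : n < 25 := by exact_mod_cast h.2
      simp only [dest_lookup sequence.toList n hn, Option.getD_some]
      exact (foldl_id_of gElem _ (fun y c hc => gElem_id y c (hno c hc).1 (hno c hc).2.1 (hno c hc).2.2.1 (hno c hc).2.2.2) _).symm
    · rfl
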